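-- pv_equiv track=rewrite | github.com/richedperson1/DSA | string/Smallest number.py | smallest_num
-- ===== SOURCE A (Python) =====
-- def smallest_num(s,d):
--
--     def small_num(s,d):
--         maxv=9*d
--         if s>maxv:
--             return -1
--         ans=""
--         # s-=1
--         for i in range(0,d):
--             if s>=9:
--                ans+=str(9)
--                s-=9
--             else:
--                 ans+=str(s)
--                 s=0
--
--         ans=ans[::-1]
--         return ans
--
--     return small_num(s,d)
-- ===== SOURCE B (Python) =====
-- def smallest_num(s, d):
--     # closed form: q nines, remainder digit r, zero-padded to d digits
--     if s > 9 * d or s < 0: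
--         return -1
--     q, r = divmod(s, 9)
--     if r == 0:
--         return "0" * (d - q) + "9" * q
--     return "0" * (d - q - 1) + str(r) + "9" * q
-- ===== Notes on version B (the rewrite author's own statement) =====
-- stated objective: simpler
-- what changed: Replaces the per-digit greedy loop and string reversal with a closed-form divmod(s,9) composition assembled by string multiplication; B also rejects negative digit sums with -1 where A emits a reversed str(s) artefact.
-- outside the precondition, e.g. on smallest_num(20, 1): A returns -1, B returns -1; on smallest_num(-3, 2): A returns '03-', B returns -1
import Mathlib
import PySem

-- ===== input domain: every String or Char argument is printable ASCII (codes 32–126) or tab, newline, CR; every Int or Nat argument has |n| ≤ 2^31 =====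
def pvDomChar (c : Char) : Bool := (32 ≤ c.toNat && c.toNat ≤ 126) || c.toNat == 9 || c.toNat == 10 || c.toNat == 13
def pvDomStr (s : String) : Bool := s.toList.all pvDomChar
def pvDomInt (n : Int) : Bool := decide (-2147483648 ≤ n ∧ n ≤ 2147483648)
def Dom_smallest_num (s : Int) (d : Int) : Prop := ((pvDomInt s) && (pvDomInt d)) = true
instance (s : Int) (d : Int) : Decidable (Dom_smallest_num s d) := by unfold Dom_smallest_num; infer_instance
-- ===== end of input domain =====

-- B replaces A's per-digit greedy loop (build reversed, then reverse) by a closed-form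
-- divmod(s,9) digit composition assembled by string repetition; simpler.

-- ===== PORT A =====
-- loop body of A's 'for i in range(0,d)': state (ans as chars, s)
def pvStepA (st : List Char × Int) (_ : Int) : List Char × Int :=
  if st.2 ≥ 9 then (st.1 ++ PySem.Int.toChars 9, st.2 - 9)
  else (st.1 ++ PySem.Int.toChars st.2, 0)

def smallest_num (s : Int) (d : Int) : Option String :=
  let maxv := 9 * d
  if s > maxv then none                      -- 'return -1' ↦ none
  else
    let fin := (PySem.List.pyRange 0 d 1).foldl pvStepA ([], s)
    some (String.ofList fin.1.reverse)           -- ans[::-1] is reverse (PySem.List.slice?_none_none_neg_one)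

-- ===== PORT B =====
def smallest_num_alt (s : Int) (d : Int) : Option String :=
  if s > 9 * d ∨ s < 0 then none
  else
    let q := PySem.Int.floordiv s 9
    let r := PySem.Int.mod s 9
    if r = 0 then
      some (String.ofList (List.replicate (d - q).toNat '0' ++ List.replicate q.toNat '9'))
    else
      some (String.ofList (List.replicate (d - q - 1).toNat '0' ++ PySem.Int.toChars r ++ List.replicate q.toNat '9'))

-- ===== PRECONDITION & SPEC =====
-- Pre_ excludes s > 9*d, where both A and B return the int -1 (not a string, outside the
-- declared return type Option String), and s < 0, where A returns a nonsense string with a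
-- minus sign in it (reversing str(s), e.g. "03-" for s=-3, d=2) while B returns the int -1 —
-- there too one of the two values is not a String.
def Pre_smallest_num (s : Int) (d : Int) : Prop := 0 ≤ s ∧ s ≤ 9 * d
instance (s : Int) (d : Int) : Decidable (Pre_smallest_num s d) := by unfold Pre_smallest_num; infer_instance
def pvWitness_smallest_num : Int × Int := (10, 3)

def Spec_smallest_num (s : Int) (d : Int) (out : Option String) : Prop := out = smallest_num_alt s d
instance (s : Int) (d : Int) (out : Option String) : Decidable (Spec_smallest_num s d out) := by
  unfold Spec_smallest_num; infer_instance

-- ===== CLAIM (what is proved, stated in full; the proofs are below) =====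
def Claim_equal_smallest_num : Prop :=
  ∀ (s : Int) (d : Int), Dom_smallest_num s d → Pre_smallest_num s d → Spec_smallest_num s d (smallest_num s d)

-- ===== LEMMAS AND PROOFS =====

-- iterate A's loop body n times (the fold ignores the range element)
def pvIterA : Nat → List Char × Int → List Char × Int
  | 0, st => st
  | n + 1, st => pvIterA n (pvStepA st 0)

lemma pvStepA_const (st : List Char × Int) (i : Int) : pvStepA st i = pvStepA st 0 := rfl

lemma foldl_eq_iterA (l : List Int) (st : List Char × Int) :
    l.foldl pvStepA st = pvIterA l.length st := by
  induction l generalizing st with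
  | nil => rfl
  | cons x xs ih => simp [List.foldl, pvIterA, pvStepA_const _ x, ih]

-- the closed-form spine that A's loop accumulates (before reversal)
def pvSpine (n : Nat) (s : Int) : List Char :=
  List.replicate (s / 9).toNat '9' ++
    (if s % 9 = 0 then List.replicate (n - (s / 9).toNat) '0'
     else PySem.Int.toChars (s % 9) ++ List.replicate (n - (s / 9).toNat - 1) '0')

lemma pvToChars_zero : PySem.Int.toChars 0 = ['0'] := by decide

lemma pvToChars_nine : PySem.Int.toChars 9 = ['9'] := by decide

lemma iterA_zero (n : Nat) : ∀ acc, pvIterA n (acc, 0) = (acc ++ List.replicate n '0', 0) := by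
  induction n with
  | zero => intro acc; simp [pvIterA]
  | succ k ih =>
      intro acc
      have h9 : ¬ ((0:Int) ≥ 9) := by omega
      simp [pvIterA, pvStepA, h9, ih, List.replicate_succ, pvToChars_zero]

lemma toChars_small (s : Int) (h0 : 0 ≤ s) (h9 : s < 9) :
    PySem.Int.toChars s = [Char.ofNat (48 + s.toNat)] := by
  interval_cases s <;> decide

lemma iterA_spec (n : Nat) : ∀ (s : Int) (acc : List Char), 0 ≤ s → s ≤ 9 * n →
    pvIterA n (acc, s) = (acc ++ pvSpine n s, 0) := by
  induction n with
  | zero =>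
      intro s acc h0 hle
      have hs : s = 0 := by omega
      subst hs; simp [pvIterA, pvSpine]
  | succ k ih =>
      intro s acc h0 hle
      by_cases h9 : s ≥ 9
      · have h1 : (0:Int) ≤ s - 9 := by omega
        have h2 : s - 9 ≤ 9 * k := by push_cast at hle ⊢; omega
        have hq : s / 9 = (s - 9) / 9 + 1 := by omega
        have hr : s % 9 = (s - 9) % 9 := by omega
        have hqn : (s / 9).toNat = ((s - 9) / 9).toNat + 1 := by omega
        simp only [pvIterA, pvStepA, if_pos h9]
        rw [ih (s - 9) _ h1 h2]
        simp only [pvSpine, hr, hqn, List.replicate_succ]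
        simp [pvToChars_nine, Nat.succ_sub_succ_eq_sub]
      · -- s < 9 : append str(s), then k zero steps
        simp only [pvIterA, pvStepA, if_neg h9]
        rw [iterA_zero]
        have hlt : s < 9 := by omega
        have hq0 : s / 9 = 0 := by omega
        by_cases hz : s = 0
        · subst hz
          simp [pvSpine, List.replicate_succ, pvToChars_zero]
        · have hr : s % 9 = s := by omega
          simp [pvSpine, hq0, hr, hz]

lemma pyIdiv_eq_floordiv (s : Int) : PySem.Int.floordiv s 9 = s / 9 :=
  PySem.Int.floordiv_eq_ediv_of_pos (by omega)

lemma pyMod_eq_emod (s : Int) : PySem.Int.mod s 9 = s % 9 :=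
  PySem.Int.mod_eq_emod_of_pos (by omega)

lemma reverse_spine (n : Nat) (s : Int) :
    (pvSpine n s).reverse =
      (if s % 9 = 0 then List.replicate (n - (s / 9).toNat) '0'
       else List.replicate (n - (s / 9).toNat - 1) '0' ++ PySem.Int.toChars (s % 9)) ++
      List.replicate (s / 9).toNat '9' := by
  have hr0 : 0 ≤ s % 9 := by omega
  have hr9 : s % 9 < 9 := by omega
  unfold pvSpine
  by_cases hz : s % 9 = 0
  · simp [hz, List.reverse_replicate]
  · simp [hz, List.reverse_replicate, toChars_small (s % 9) hr0 hr9]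

lemma smallest_num_eq_alt (s d : Int) (h0 : 0 ≤ s) (hle : s ≤ 9 * d) :
    smallest_num s d = smallest_num_alt s d := by
  have hd0 : 0 ≤ d := by omega
  have hnotgt : ¬ s > 9 * d := by omega
  have hnot : ¬ (s > 9 * d ∨ s < 0) := by omega
  unfold smallest_num smallest_num_alt
  simp only [if_neg hnotgt, if_neg hnot]
  rw [foldl_eq_iterA, PySem.List.length_pyRange_one]
  have hlen : s ≤ 9 * ((d - 0).toNat : Int) := by omega
  rw [iterA_spec (d - 0).toNat s [] h0 hlen]
  simp only [List.nil_append]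
  rw [reverse_spine _ s]
  rw [pyIdiv_eq_floordiv s, pyMod_eq_emod s]
  have hq0 : 0 ≤ s / 9 := by omega
  have hqd : s / 9 ≤ d := by omega
  have e1 : d.toNat - (s / 9).toNat = (d - s / 9).toNat := by omega
  have e2 : (d - s / 9).toNat - 1 = (d - s / 9 - 1).toNat := by omega
  by_cases hz : s % 9 = 0
  · rw [if_pos hz, if_pos hz]
    simp only [Int.sub_zero, e1]
  · rw [if_neg hz, if_neg hz]
    simp only [Int.sub_zero, e1, e2, List.append_assoc]

-- ===== VERDICT (by name: the statement is the Claim_ definition above) =====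
theorem smallest_num_spec : Claim_equal_smallest_num := by
  intro s d _ hpre
  exact smallest_num_eq_alt s d hpre.1 hpre.2
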